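-- pv_equiv track=rewrite | github.com/wangshenguiuc/evalscope | evalscope/benchmarks/imo_answer_bench/grader.py | _split_set_items
-- ===== SOURCE A (Python) =====
-- def _split_set_items(answer: str) -> list[str] | None:
--     if not answer:
--         return None
--     if "\\cup" in answer:
--         parts = []
--         for component in answer.split("\\cup"):
--             items = _split_set_items(component.strip())
--             if items is None:
--                 return None
--             parts.extend(items)
--         return parts
--     stripped = answer.strip()
--     if not (stripped.startswith("{") and stripped.endswith("}")):
--         return None
--     inner = stripped[1:-1].strip()
--     if not inner:
--         return []
--     return [part.strip() for part in inner.split(",") if part.strip()]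
-- ===== SOURCE B (Python) =====
-- def _split_set_items(answer: str) -> list[str] | None:
--     if not answer:
--         return None
--     items = []
--     for component in answer.split("\\cup"):
--         s = component.strip()
--         if not (s.startswith("{") and s.endswith("}")):
--             return None
--         inner = s[1:-1].strip()
--         if inner:
--             items.extend(p.strip() for p in inner.split(",") if p.strip())
--     return items
-- ===== Notes on version B (the rewrite author's own statement) =====
-- stated objective: simpler
-- what changed: Replaces A's recursive None-propagating descent with a single flat loop: always split on '\cup' (one component if absent), parse each component's braces inline, and merge A's two branches into one pass.
import Mathlib
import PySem

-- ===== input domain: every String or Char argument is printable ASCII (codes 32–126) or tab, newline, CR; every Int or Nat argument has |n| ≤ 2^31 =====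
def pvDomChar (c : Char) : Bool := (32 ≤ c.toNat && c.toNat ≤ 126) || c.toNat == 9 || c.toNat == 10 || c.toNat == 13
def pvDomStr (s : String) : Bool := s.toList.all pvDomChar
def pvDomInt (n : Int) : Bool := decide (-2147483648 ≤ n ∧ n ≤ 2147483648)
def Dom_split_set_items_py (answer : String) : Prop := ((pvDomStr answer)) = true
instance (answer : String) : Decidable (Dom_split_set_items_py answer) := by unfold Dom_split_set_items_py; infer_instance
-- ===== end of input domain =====

-- B replaces A's recursion with one flat loop over the '\cup'-split components (objective: simpler).

-- ===== PORT A =====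
-- A is recursive; the fuel argument only makes the recursion structural and is never
-- exhausted (the recursion depth of the Python is bounded, see lemma goA_of_not_isIn below).
def split_set_items_goA : Nat → String → Option (List String)
  | 0, _ => none
  | fuel+1, answer =>
    if answer = "" then none
    else if PySem.Str.isIn "\\cup" answer = true then
      (PySem.Chars.splitOn answer.toList "\\cup".toList).foldl
        (fun acc comp =>
          match acc with
          | none => none
          | some parts =>
            match split_set_items_goA fuel (PySem.Str.strip (String.ofList comp)) with
            | none => none
            | some items => some (parts ++ items))
        (some [])
    else
      let stripped := PySem.Str.strip answer
      if (PySem.Str.startswith stripped "{" && PySem.Str.endswith stripped "}") = true then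
        let inner := PySem.Str.strip (PySem.Str.slice stripped (some 1) (some (-1)))
        if inner = "" then some []
        else some (((PySem.Chars.splitOn inner.toList [',']).filter
                      (fun p => PySem.Chars.strip p ≠ [])).map
                    (fun p => String.ofList (PySem.Chars.strip p)))
      else none

def split_set_items_py (answer : String) : Option (List String) :=
  split_set_items_goA (answer.length + 1) answer

-- ===== PORT B =====
def parse_component_alt (component : String) : Option (List String) :=
  let s := PySem.Str.strip component
  if (PySem.Str.startswith s "{" && PySem.Str.endswith s "}") = true then
    let inner := PySem.Str.strip (PySem.Str.slice s (some 1) (some (-1)))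
    if inner = "" then some []
    else some (((PySem.Chars.splitOn inner.toList [',']).filter
                  (fun p => PySem.Chars.strip p ≠ [])).map
                (fun p => String.ofList (PySem.Chars.strip p)))
  else none

def split_set_items_py_alt (answer : String) : Option (List String) :=
  if answer = "" then none
  else
    (PySem.Chars.splitOn answer.toList "\\cup".toList).foldl
      (fun acc comp =>
        match acc, parse_component_alt (String.ofList comp) with
        | some items, some more => some (items ++ more)
        | _, _ => none)
      (some [])

-- ===== PRECONDITION & SPEC =====
def Spec_split_set_items_py (answer : String) (out : Option (List String)) : Prop := out = split_set_items_py_alt answer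
instance (answer : String) (out : Option (List String)) : Decidable (Spec_split_set_items_py answer out) := by unfold Spec_split_set_items_py; infer_instance

-- ===== CLAIM (what is proved, stated in full; the proofs are below) =====
def Claim_equal_split_set_items_py : Prop := ∀ (answer : String), Dom_split_set_items_py answer → Spec_split_set_items_py answer (split_set_items_py answer)

-- ===== LEMMAS AND PROOFS =====


theorem infix_iff_drop (sub s : List Char) : sub <:+: s ↔ ∃ j, sub <+: s.drop j := by
  rw [← PySem.Chars.isIn_iff_infix, ← PySem.Chars.exists_prefix_drop_iff_isIn]

theorem cur_no_sep (sep cur l : List Char) (hsep : sep ≠ [])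
    (hcur : ∀ j < cur.length, ¬ sep <+: (cur.reverse.drop j ++ l)) :
    ¬ sep <:+: cur.reverse := by
  intro hin
  obtain ⟨j, hj⟩ := (infix_iff_drop _ _).mp hin
  by_cases hjl : j < cur.length
  · exact hcur j hjl (hj.trans (List.prefix_append _ _))
  · rw [List.drop_eq_nil_of_le (by simpa using Nat.le_of_not_lt hjl)] at hj
    exact hsep (List.prefix_nil.mp hj)

theorem splitOn_go_single (sep : List Char) (fuel : Nat) (l cur : List Char)
    (acc : List (List Char)) (hfuel : l.length ≤ fuel)
    (h : ¬ sep <:+: l) :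
    PySem.Chars.splitOn.go sep fuel l cur acc = acc.reverse ++ [cur.reverse ++ l] := by
  induction fuel generalizing l cur with
  | zero =>
    have : l = [] := List.eq_nil_of_length_eq_zero (Nat.le_zero.mp hfuel)
    subst this
    rw [PySem.Chars.splitOn.go]; simp
  | succ fuel ih =>
    cases l with
    | nil =>
      have hg : PySem.Chars.splitOn.go sep (fuel+1) [] cur acc = (cur.reverse :: acc).reverse := by
        rw [PySem.Chars.splitOn.go]; simp
      rw [hg]; simp
    | cons c rest =>
      have hpre : sep.isPrefixOf (c :: rest) = false := by
        rw [Bool.eq_false_iff]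
        intro hp
        exact h ((List.isPrefixOf_iff_prefix.mp hp).isInfix)
      rw [PySem.Chars.splitOn.go]
      simp only [hpre, if_false, Bool.false_eq_true]
      rw [ih rest (c :: cur) (by simpa using Nat.le_of_succ_le_succ (by simpa using hfuel))
        (fun hi => h (List.infix_cons hi))]
      simp

theorem splitOn_single (s sep : List Char) (h : ¬ sep <:+: s) :
    PySem.Chars.splitOn s sep = [s] := by
  unfold PySem.Chars.splitOn
  rw [splitOn_go_single sep (s.length + 1) s [] [] (Nat.le_succ _) h]
  simp

theorem splitOn_go_no_sep (sep : List Char) (hsep : sep ≠ [])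
    (fuel : Nat) (l cur : List Char) (acc : List (List Char))
    (hfuel : l.length ≤ fuel)
    (hcur : ∀ j < cur.length, ¬ sep <+: (cur.reverse.drop j ++ l))
    (hacc : ∀ p ∈ acc, ¬ sep <:+: p) :
    ∀ p ∈ PySem.Chars.splitOn.go sep fuel l cur acc, ¬ sep <:+: p := by
  induction fuel generalizing l cur acc with
  | zero =>
    have : l = [] := List.eq_nil_of_length_eq_zero (Nat.le_zero.mp hfuel)
    subst this
    rw [PySem.Chars.splitOn.go]
    intro p hp
    simp at hp
    rcases hp with hp | hp
    all_goals first
      | exact hacc p hp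
      | (rw [hp]; exact cur_no_sep sep cur [] hsep hcur)
  | succ fuel ih =>
    cases l with
    | nil =>
      have hg : PySem.Chars.splitOn.go sep (fuel+1) [] cur acc = (cur.reverse :: acc).reverse := by
        rw [PySem.Chars.splitOn.go]; simp
      rw [hg]
      intro p hp
      simp at hp
      rcases hp with hp | hp
      all_goals first
        | exact hacc p hp
        | (rw [hp]; exact cur_no_sep sep cur [] hsep (by simpa using hcur))
    | cons c rest =>
      rw [PySem.Chars.splitOn.go]
      by_cases hpre : sep.isPrefixOf (c :: rest) = true
      · simp only [hpre, if_true]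
        apply ih
        · have hlen : 1 ≤ sep.length := by
            cases sep with
            | nil => exact absurd rfl hsep
            | cons _ _ => simp
          have : (c :: rest).length ≤ fuel + 1 := hfuel
          simp only [List.length_drop]
          omega
        · intro j hj; simp at hj
        · intro p hp
          simp at hp
          rcases hp with hp | hp
          · rw [hp]; exact cur_no_sep sep cur (c :: rest) hsep hcur
          · exact hacc p hp
      · simp only [hpre, if_false, Bool.false_eq_true]
        apply ih
        · simpa using Nat.le_of_succ_le_succ (by simpa using hfuel)
        · intro j hj
          simp only [List.length_cons] at hj
          rcases Nat.lt_succ_iff_lt_or_eq.mp hj with hj' | hj'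
          · have hd : ((c :: cur).reverse).drop j = cur.reverse.drop j ++ [c] := by
              rw [List.reverse_cons, List.drop_append_of_le_length (by simpa using Nat.le_of_lt hj')]
            rw [hd, List.append_assoc]
            exact hcur j hj'
          · subst hj'
            have hd : ((c :: cur).reverse).drop cur.length = [c] := by
              rw [List.reverse_cons, List.drop_append_of_le_length (by simp)]
              simp
            rw [hd]
            intro hp
            exact (Bool.eq_false_iff.mp (Bool.not_eq_true _ ▸ (by simpa using hpre))) (List.isPrefixOf_iff_prefix.mpr hp)
        · exact hacc

theorem splitOn_no_sep (s sep : List Char) (hsep : sep ≠ []) :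
    ∀ p ∈ PySem.Chars.splitOn s sep, ¬ sep <:+: p := by
  unfold PySem.Chars.splitOn
  exact splitOn_go_no_sep sep hsep _ s [] [] (Nat.le_succ _) (by simp) (by simp)
theorem lstrip_idem (s : List Char) :
    PySem.Chars.lstrip (PySem.Chars.lstrip s) = PySem.Chars.lstrip s :=
  List.dropWhile_idempotent _ s

theorem lstrip_of_prefix (s t : List Char) (h : t <+: s)
    (hs : PySem.Chars.lstrip s = s) : PySem.Chars.lstrip t = t := by
  unfold PySem.Chars.lstrip at *
  cases t with
  | nil => simp
  | cons c t' =>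
    obtain ⟨u, hu⟩ := h
    subst hu
    rw [List.dropWhile_eq_self_iff] at hs
    have hc := hs (by simp)
    simp at hc
    simp [hc]

theorem rstrip_prefix (s : List Char) : PySem.Chars.rstrip s <+: s := by
  unfold PySem.Chars.rstrip
  have := List.dropWhile_suffix (l := s.reverse) PySem.Chars.isspace
  have h2 := List.reverse_prefix.mpr this
  simpa using h2

theorem rstrip_idem (s : List Char) :
    PySem.Chars.rstrip (PySem.Chars.rstrip s) = PySem.Chars.rstrip s := by
  unfold PySem.Chars.rstrip
  simp [List.dropWhile_idempotent]

theorem chars_strip_idem (s : List Char) :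
    PySem.Chars.strip (PySem.Chars.strip s) = PySem.Chars.strip s := by
  unfold PySem.Chars.strip
  rw [lstrip_of_prefix (PySem.Chars.lstrip s) _ (rstrip_prefix _) (lstrip_idem s),
    rstrip_idem]

theorem strip_idem (s : String) :
    PySem.Str.strip (PySem.Str.strip s) = PySem.Str.strip s := by
  unfold PySem.Str.strip
  simp [chars_strip_idem]

theorem chars_strip_infix (s : List Char) : PySem.Chars.strip s <:+: s := by
  rw [List.infix_iff_prefix_suffix]
  exact ⟨PySem.Chars.lstrip s, rstrip_prefix _, List.dropWhile_suffix _⟩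

theorem isIn_strip_false (sub s : String) (h : PySem.Str.isIn sub s = false) :
    PySem.Str.isIn sub (PySem.Str.strip s) = false := by
  rw [← Bool.not_eq_true] at h ⊢
  rw [PySem.Str.isIn_iff_infix] at h ⊢
  intro hin
  apply h
  refine hin.trans ?_
  have ht : (PySem.Str.strip s).toList = PySem.Chars.strip s.toList := by
    unfold PySem.Str.strip; simp
  rw [ht]
  exact chars_strip_infix _

theorem goA_of_not_isIn (fuel : Nat) (s : String)
    (h : PySem.Str.isIn "\\cup" s = false) :
    split_set_items_goA (fuel + 1) s = parse_component_alt s := by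
  rw [split_set_items_goA]
  by_cases he : s = ""
  · subst he; simp; decide
  · rw [if_neg he, if_neg (by simpa using h)]
    rfl

theorem parse_component_alt_strip (s : String) :
    parse_component_alt (PySem.Str.strip s) = parse_component_alt s := by
  unfold parse_component_alt
  rw [strip_idem]

theorem isIn_ofList_piece (answer : String) (comp : List Char)
    (hc : comp ∈ PySem.Chars.splitOn answer.toList "\\cup".toList) :
    PySem.Str.isIn "\\cup" (String.ofList comp) = false := by
  rw [Bool.eq_false_iff, Ne, PySem.Str.isIn_iff_infix]
  simpa using splitOn_no_sep answer.toList "\\cup".toList (by decide) comp hc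

theorem main_eq (answer : String) :
    split_set_items_py answer = split_set_items_py_alt answer := by
  unfold split_set_items_py split_set_items_py_alt
  by_cases he : answer = ""
  · subst he; decide
  · rw [if_neg he]
    have hk : 1 ≤ answer.length := by
      rcases Nat.eq_zero_or_pos answer.length with h0 | h1
      · exact absurd (String.length_eq_zero_iff.mp h0) he
      · exact h1
    obtain ⟨k, hkk⟩ : ∃ k, answer.length = k + 1 := ⟨answer.length - 1, by omega⟩
    rw [hkk, split_set_items_goA, if_neg he]
    by_cases hin : PySem.Str.isIn "\\cup" answer = true
    · rw [if_pos hin]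
      apply PySem.List.foldl_congr_mem
      intro acc comp hc
      have h1 : PySem.Str.isIn "\\cup" (String.ofList comp) = false :=
        isIn_ofList_piece answer comp hc
      have h2 := isIn_strip_false _ _ h1
      rw [goA_of_not_isIn k _ h2, parse_component_alt_strip]
      cases acc with
      | none => rfl
      | some parts =>
        cases hpc : parse_component_alt (String.ofList comp) with
        | none => rfl
        | some items => rfl
    · rw [if_neg hin]
      have hnin : ¬ ("\\cup".toList : List Char) <:+: answer.toList := by
        rw [← PySem.Str.isIn_iff_infix]
        exact hin
      rw [splitOn_single answer.toList _ hnin]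
      have hfix : String.ofList answer.toList = answer := by simp
      have hA := goA_of_not_isIn k answer (Bool.eq_false_iff.mpr hin)
      rw [split_set_items_goA, if_neg he, if_neg hin] at hA
      simp only [List.foldl_cons, List.foldl_nil, hfix]
      rw [hA]
      cases hpc : parse_component_alt answer with
      | none => rfl
      | some items => simp

-- ===== VERDICT (by name: the statement is the Claim_ definition above) =====
theorem split_set_items_py_spec : Claim_equal_split_set_items_py := by
  intro answer _
  unfold Spec_split_set_items_py
  exact main_eq answer
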